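-- pv_equiv track=rewrite | github.com/christianfelt/kattis_solutions | zero_one_sequences/zero_one_sequences_beads.py | make_two_k_strings
-- ===== SOURCE A (Python) =====
-- def make_two_k_strings(s):
--     two_k_strings = []
--     k = s.count('?')
--     for i in range(2 ** k):
--         this_perm = bin(i)[2:].zfill(k)  # Strip 0b prefix off binary number.
--         this_s = s
--         for j in range(k):
--             this_s = this_s.replace('?', this_perm[j], 1)
--         two_k_strings.append(this_s)
--     return two_k_strings
-- ===== SOURCE B (Python) =====
-- def make_two_k_strings(s):
--     # Recurse on the first '?': every filling is (text before it) + bit + (a filling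
--     # of the rest), with the '0' branch enumerated before the '1' branch.
--     i = s.find('?')
--     if i == -1:
--         return [s]
--     pre = s[:i]
--     rest = make_two_k_strings(s[i + 1:])
--     return [pre + '0' + t for t in rest] + [pre + '1' + t for t in rest]
-- ===== Notes on version B (the rewrite author's own statement) =====
-- stated objective: alternative
-- what changed: Replaces A's enumeration by counting i up to 2**k, formatting i with bin/zfill and applying k one-shot str.replace passes per output, by a recursion on the first '?' that enumerates the fillings of the rest once and prefixes each with the text before the '?' and either bit.
import Mathlib
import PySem

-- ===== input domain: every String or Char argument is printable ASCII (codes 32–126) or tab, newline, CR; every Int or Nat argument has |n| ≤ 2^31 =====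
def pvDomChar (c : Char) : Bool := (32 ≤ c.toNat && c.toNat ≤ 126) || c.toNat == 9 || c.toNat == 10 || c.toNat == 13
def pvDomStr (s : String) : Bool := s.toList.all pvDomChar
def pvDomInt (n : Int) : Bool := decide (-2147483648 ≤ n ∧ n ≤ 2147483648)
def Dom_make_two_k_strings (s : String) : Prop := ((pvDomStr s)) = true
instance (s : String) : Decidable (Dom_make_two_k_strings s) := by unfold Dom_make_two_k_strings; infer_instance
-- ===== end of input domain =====

-- B replaces A's integer-counting + bin/zfill + repeated one-shot replace enumeration by a
-- recursion on the first '?' that prefixes each filling of the rest with either bit (objective: alternative).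

-- ===== PORT A =====
-- s.replace('?', c, 1): exact hand port — the pattern is the single character '?', count 1,
-- so it replaces the first occurrence of '?' (if any) and leaves the rest unchanged.
def pvReplQ : List Char → Char → List Char
  | [], _ => []
  | x :: xs, c => if x = '?' then c :: xs else x :: pvReplQ xs c

def make_two_k_strings (s : String) : List String :=
  let k := PySem.Str.count s "?"
  (PySem.List.pyRange 0 ((2:Int)^k) 1).foldl
    (fun acc i =>
      -- this_perm = bin(i)[2:].zfill(k)
      let this_perm : List Char :=
        PySem.Chars.zfill (PySem.List.slice (PySem.Int.toBinChars0b i) (some 2) none) (k : Int)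
      -- for j in range(k): this_s = this_s.replace('?', this_perm[j], 1)
      -- (this_perm[j] is always in range: len(this_perm) ≥ k)
      let this_s : List Char :=
        (PySem.List.pyRange 0 (k : Int) 1).foldl
          (fun t j => pvReplQ t (PySem.List.pyGetD this_perm j ' ')) s.toList
      acc ++ [String.mk this_s]) []

-- ===== PORT B =====
-- the slice after the first '?' is strictly shorter (for the recursion below)
theorem pvSuffix_lt (cs : List Char) (h : ¬ PySem.Chars.find cs ['?'] = -1) :
    (PySem.List.slice cs (some (PySem.Chars.find cs ['?'] + 1)) none).length < cs.length := by
  have h0 : (0:Int) ≤ PySem.Chars.find cs ['?'] := by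
    have := PySem.Chars.neg_one_le_find cs ['?']
    omega
  have hspec := PySem.Chars.find_spec h0
  have hlt : (PySem.Chars.find cs ['?']).toNat < cs.length := by
    rcases hspec.1 with ⟨t, ht⟩
    have hlen := congrArg List.length ht
    simp only [List.length_append, List.length_drop, List.length_singleton] at hlen
    omega
  rw [PySem.List.slice_from _ (by omega : (0:Int) ≤ PySem.Chars.find cs ['?'] + 1)]
  simp only [List.length_drop]
  omega

-- i = s.find('?'); if i == -1: [s] else [s[:i]+'0'+t] ++ [s[:i]+'1'+t] over fillings of s[i+1:]
def pvFindFill (cs : List Char) : List (List Char) :=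
  if h : PySem.Chars.find cs ['?'] = -1 then [cs]
  else
    let pre := PySem.List.slice cs none (some (PySem.Chars.find cs ['?']))
    let rest := pvFindFill (PySem.List.slice cs (some (PySem.Chars.find cs ['?'] + 1)) none)
    rest.map (fun t => pre ++ '0' :: t) ++ rest.map (fun t => pre ++ '1' :: t)
  termination_by cs.length
  decreasing_by exact pvSuffix_lt cs h

def make_two_k_strings_alt (s : String) : List String :=
  (pvFindFill s.toList).map String.mk

-- ===== PRECONDITION & SPEC =====
def Spec_make_two_k_strings (s : String) (out : List String) : Prop := out = make_two_k_strings_alt s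
instance (s : String) (out : List String) : Decidable (Spec_make_two_k_strings s out) := by unfold Spec_make_two_k_strings; infer_instance

-- ===== CLAIM (what is proved, stated in full; the proofs are below) =====
def Claim_equal_make_two_k_strings : Prop := ∀ (s : String), Dom_make_two_k_strings s → Spec_make_two_k_strings s (make_two_k_strings s)

-- ===== LEMMAS AND PROOFS =====

-- B's recursion tree, written structurally (proof-side bridge between the two ports)
def pvFill : List Char → List (List Char)
  | [] => [[]]
  | c :: cs =>
    let rest := pvFill cs
    if c = '?' then rest.map (fun t => '0' :: t) ++ rest.map (fun t => '1' :: t)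
    else rest.map (fun t => c :: t)

-- left-pad with '0' to width k
def pvPad (p : List Char) (k : Nat) : List Char := List.replicate (k - p.length) '0' ++ p

-- binary digits, msb first, empty for 0
def pvBits (n : Nat) : List Char :=
  if h : n = 0 then [] else pvBits (n / 2) ++ [Nat.digitChar (n % 2)]
  decreasing_by exact Nat.div_lt_self (Nat.pos_of_ne_zero h) (by omega)

-- bin(n)[2:] for n ≥ 0, as Python formats it (msb first, "0" for 0)
def pvBinAux (n : Nat) : List Char :=
  if h : n / 2 = 0 then [Nat.digitChar (n % 2)]
  else pvBinAux (n / 2) ++ [Nat.digitChar (n % 2)]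
  decreasing_by exact Nat.div_lt_self (by omega) (by omega)

-- substitute the '?' of cs by the bits of p, in order
def pvSubst : List Char → List Char → List Char
  | [], _ => []
  | c :: cs, bs =>
    if c = '?' then
      match bs with
      | b :: bs' => b :: pvSubst cs bs'
      | [] => c :: cs
    else c :: pvSubst cs bs

theorem pvBits_zero : pvBits 0 = [] := by rw [pvBits]; simp

theorem pvBinAux_zero : pvBinAux 0 = ['0'] := by rw [pvBinAux]; simp [Nat.digitChar]

theorem pvSubst_nil_right : ∀ cs, pvSubst cs [] = cs := by
  intro cs; induction cs with
  | nil => rfl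
  | cons c cs ih => simp only [pvSubst]; split_ifs <;> simp [ih]

theorem pvSubst_count_zero : ∀ cs p, cs.count '?' = 0 → pvSubst cs p = cs := by
  intro cs; induction cs with
  | nil => intro p _; rfl
  | cons c cs ih =>
    intro p h
    have hc : c ≠ '?' := by
      intro hcq; subst hcq; simp [List.count_cons] at h
    have hcs : cs.count '?' = 0 := by
      simp [List.count_cons] at h; omega
    simp [pvSubst, hc, ih p hcs]

theorem pvBits_length_le : ∀ k n, n < 2 ^ k → (pvBits n).length ≤ k := by
  intro k; induction k with
  | zero => intro n h; interval_cases n; simp [pvBits]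
  | succ k ih =>
    intro n h
    by_cases h0 : n = 0
    · subst h0; simp [pvBits]
    · rw [pvBits]; simp only [h0, dite_false, List.length_append, List.length_singleton]
      have : n / 2 < 2 ^ k := by omega
      have := ih (n / 2) this
      omega

theorem pvBinAux_eq : ∀ n, pvBinAux n = if n = 0 then ['0'] else pvBits n := by
  intro n
  induction n using Nat.strong_induction_on with
  | _ n ih =>
    by_cases h0 : n = 0
    · subst h0; simp [pvBinAux, Nat.digitChar]
    · simp only [h0, if_false]
      by_cases h1 : n / 2 = 0
      · have hn1 : n = 1 := by omega
        subst hn1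
        simp [pvBinAux, pvBits, Nat.digitChar]
      · rw [pvBinAux]; simp only [h1, dite_false]
        rw [ih (n / 2) (Nat.div_lt_self (by omega) (by omega))]
        simp only [h1, if_false]
        conv_rhs => rw [pvBits]
        simp [h0]

theorem pvBits_mem : ∀ n d, d ∈ pvBits n → d = '0' ∨ d = '1' := by
  intro n
  induction n using Nat.strong_induction_on with
  | _ n ih =>
    intro d hd
    by_cases h0 : n = 0
    · subst h0; simp [pvBits] at hd
    · rw [pvBits] at hd; simp only [h0, dite_false, List.mem_append, List.mem_singleton] at hd
      rcases hd with hd | hd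
      · exact ih (n / 2) (Nat.div_lt_self (by omega) (by omega)) d hd
      · subst hd
        have : n % 2 = 0 ∨ n % 2 = 1 := by omega
        rcases this with h | h <;> simp [h, Nat.digitChar]

theorem pvBinAux_mem : ∀ n d, d ∈ pvBinAux n → d = '0' ∨ d = '1' := by
  intro n d hd
  rw [pvBinAux_eq] at hd
  by_cases h0 : n = 0
  · simp [h0] at hd; simp [hd]
  · simp only [h0, if_false] at hd; exact pvBits_mem n d hd

theorem pvPad_mem : ∀ p k d, d ∈ pvPad p k → d ∈ p ∨ d = '0' := by
  intro p k d hd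
  simp only [pvPad, List.mem_append, List.mem_replicate] at hd
  tauto

theorem pvPad_length : ∀ p k, (pvPad p k).length = max p.length k := by
  intro p k; simp [pvPad]; omega

theorem pvPad_succ : ∀ p k, p.length ≤ k → pvPad p (k + 1) = '0' :: pvPad p k := by
  intro p k h
  simp only [pvPad]
  have : k + 1 - p.length = (k - p.length) + 1 := by omega
  rw [this, List.replicate_succ, List.cons_append]

theorem pvPad_eq_self : ∀ p k, k ≤ p.length → pvPad p k = p := by
  intro p k h; simp [pvPad, Nat.sub_eq_zero_of_le h]

theorem pvBits_add_pow : ∀ k r, r < 2 ^ k → pvBits (2 ^ k + r) = '1' :: pvPad (pvBits r) k := by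
  intro k
  induction k with
  | zero =>
    intro r h; interval_cases r
    simp [pvBits, pvPad, Nat.digitChar]
  | succ k ih =>
    intro r h
    have hne : 2 ^ (k + 1) + r ≠ 0 := by positivity
    rw [pvBits]; simp only [hne, dite_false]
    have hdiv : (2 ^ (k + 1) + r) / 2 = 2 ^ k + r / 2 := by omega
    have hmod : (2 ^ (k + 1) + r) % 2 = r % 2 := by omega
    rw [hdiv, hmod, ih (r / 2) (by omega)]
    by_cases hr : r = 0
    · subst hr
      simp [pvBits, pvPad, Nat.digitChar, List.replicate_succ']
    · conv_rhs => rw [pvBits]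
      simp only [hr, dite_false]
      have hlen : (pvBits (r / 2) ++ [Nat.digitChar (r % 2)]).length = (pvBits (r / 2)).length + 1 := by
        simp
      simp only [pvPad, hlen, List.length_append]
      have : k + 1 - ((pvBits (r / 2)).length + 1) = k - (pvBits (r / 2)).length := by omega
      rw [this]
      simp

-- foldl of pvReplQ over a non-'?' head
theorem pvReplQ_foldl_cons : ∀ (p : List Char) c cs, c ≠ '?' →
    p.foldl pvReplQ (c :: cs) = c :: p.foldl pvReplQ cs := by
  intro p
  induction p with
  | nil => intro c cs _; rfl
  | cons b p ih =>
    intro c cs hc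
    simp only [List.foldl_cons, pvReplQ, hc, if_false]
    exact ih c (pvReplQ cs b) hc

theorem pvReplQ_foldl_nil : ∀ (p : List Char), p.foldl pvReplQ [] = [] := by
  intro p; induction p with
  | nil => rfl
  | cons b p ih => simpa [pvReplQ] using ih

theorem pvReplQ_foldl_eq_subst : ∀ cs p, (∀ d ∈ p, d ≠ '?') → cs.count '?' ≤ p.length →
    p.foldl pvReplQ cs = pvSubst cs p := by
  intro cs
  induction cs with
  | nil => intro p _ _; simp [pvReplQ_foldl_nil, pvSubst]
  | cons c cs ih =>
    intro p hp hlen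
    by_cases hc : c = '?'
    · subst hc
      have : cs.count '?' + 1 ≤ p.length := by simpa [List.count_cons] using hlen
      match p with
      | [] => simp at this
      | b :: p' =>
        have hb : b ≠ '?' := hp b (List.mem_cons_self)
        simp only [List.foldl_cons, pvReplQ, if_true, pvSubst]
        rw [pvReplQ_foldl_cons p' b cs hb]
        rw [ih p' (fun d hd => hp d (List.mem_cons_of_mem b hd)) (by simp at this ⊢; omega)]
    · rw [pvReplQ_foldl_cons p c cs hc]
      have hcnt : cs.count '?' ≤ p.length := by
        simp [List.count_cons, hc] at hlen ⊢; omega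
      rw [ih p hp hcnt]
      simp [pvSubst, hc]

-- the bits actually used: both pads substitute identically when count cs = k
theorem pvSubst_pad_bits_eq_binAux : ∀ cs r k, cs.count '?' = k → r < 2 ^ k →
    pvSubst cs (pvPad (pvBits r) k) = pvSubst cs (pvPad (pvBinAux r) k) := by
  intro cs r k hk hr
  rw [pvBinAux_eq]
  by_cases hr0 : r = 0
  · subst hr0
    simp only [if_true]
    by_cases hk0 : k = 0
    · subst hk0
      rw [pvSubst_count_zero cs _ hk, pvSubst_count_zero cs _ hk]
    · have : pvPad (pvBits 0) k = pvPad ['0'] k := by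
        rw [pvBits_zero]
        simp only [pvPad, List.length_nil, List.length_singleton, Nat.sub_zero, List.append_nil]
        have : k = (k - 1) + 1 := by omega
        rw [this, List.replicate_succ']
        simp
      rw [this]
  · simp [hr0]

-- main enumeration lemma: A's per-index substitution, over range(2^k), is B's recursion
theorem pv_main : ∀ cs : List Char,
    (List.range (2 ^ cs.count '?')).map
      (fun j => pvSubst cs (pvPad (pvBinAux j) (cs.count '?'))) = pvFill cs := by
  intro cs
  induction cs with
  | nil =>
    simp [List.range_succ, pvSubst, pvFill]
  | cons c cs ih =>
    by_cases hc : c = '?'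
    · subst hc
      have hcnt : (('?' : Char) :: cs).count '?' = cs.count '?' + 1 := by
        simp [List.count_cons]
      rw [hcnt]
      have hsplit : (2 : Nat) ^ (cs.count '?' + 1) = 2 ^ cs.count '?' + 2 ^ cs.count '?' := by ring
      rw [hsplit, List.range_add, List.map_append, List.map_map]
      have hfirst : (List.range (2 ^ cs.count '?')).map
          (fun j => pvSubst ('?' :: cs) (pvPad (pvBinAux j) (cs.count '?' + 1)))
          = (pvFill cs).map (fun t => '0' :: t) := by
        rw [← ih, List.map_map]
        apply List.map_congr_left
        intro j hj
        simp only [List.mem_range] at hj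
        simp only [Function.comp_apply]
        by_cases hk0 : cs.count '?' = 0
        · -- k' = 0 forces j = 0
          rw [hk0] at hj ⊢
          interval_cases j
          rw [pvBinAux_zero]
          show pvSubst ('?' :: cs) (pvPad ['0'] (0 + 1)) = '0' :: pvSubst cs (pvPad ['0'] 0)
          have h1 : pvPad ['0'] (0 + 1) = ['0'] := pvPad_eq_self _ _ (by simp)
          have h0 : pvPad ['0'] 0 = ['0'] := pvPad_eq_self _ _ (by simp)
          rw [h1, h0]
          simp only [pvSubst, if_true]
          rw [pvSubst_nil_right, pvSubst_count_zero cs _ hk0]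
        · have hlen : (pvBinAux j).length ≤ cs.count '?' := by
            by_cases hj0 : j = 0
            · subst hj0; rw [pvBinAux_zero]; simp only [List.length_singleton]; omega
            · rw [pvBinAux_eq]; simp only [hj0, if_false]
              exact pvBits_length_le _ _ hj
          rw [pvPad_succ _ _ hlen]
          simp [pvSubst]
      have hsecond : (List.range (2 ^ cs.count '?')).map
          ((fun j => pvSubst ('?' :: cs) (pvPad (pvBinAux j) (cs.count '?' + 1))) ∘
            (fun k => 2 ^ cs.count '?' + k))
          = (pvFill cs).map (fun t => '1' :: t) := by
        rw [← ih, List.map_map]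
        apply List.map_congr_left
        intro r hr
        simp only [List.mem_range] at hr
        simp only [Function.comp_apply]
        have hbin : pvBinAux (2 ^ cs.count '?' + r) = '1' :: pvPad (pvBits r) (cs.count '?') := by
          rw [pvBinAux_eq]
          have : 2 ^ cs.count '?' + r ≠ 0 := by positivity
          simp only [this, if_false]
          exact pvBits_add_pow _ _ hr
        rw [hbin]
        have hpadlen : ('1' :: pvPad (pvBits r) (cs.count '?')).length = cs.count '?' + 1 := by
          simp only [List.length_cons, pvPad_length]
          have := pvBits_length_le (cs.count '?') r hr
          omega
        rw [pvPad_eq_self _ _ (le_of_eq hpadlen.symm)]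
        simp only [pvSubst, if_true]
        rw [pvSubst_pad_bits_eq_binAux cs r (cs.count '?') rfl hr]
      rw [hfirst, hsecond]
      simp [pvFill]
    · have hcnt : ((c : Char) :: cs).count '?' = cs.count '?' := by
        simp [List.count_cons, hc]
      rw [hcnt]
      have : ∀ j, pvSubst (c :: cs) (pvPad (pvBinAux j) (cs.count '?'))
          = c :: pvSubst cs (pvPad (pvBinAux j) (cs.count '?')) := by
        intro j; simp [pvSubst, hc]
      simp only [this]
      rw [show (fun j => c :: pvSubst cs (pvPad (pvBinAux j) (cs.count '?')))
            = (fun t => c :: t) ∘ (fun j => pvSubst cs (pvPad (pvBinAux j) (cs.count '?'))) from rfl,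
          ← List.map_map, ih]
      simp [pvFill, hc]

-- PySem plumbing: Str.count s "?" is List.count '?'
theorem pvCount_go : ∀ (l : List Char) (fuel acc : Nat), l.length ≤ fuel →
    PySem.Chars.count.go ['?'] fuel l acc = acc + l.count '?' := by
  intro l
  induction l with
  | nil =>
    intro fuel acc _
    match fuel with
    | 0 => simp [PySem.Chars.count.go]
    | fuel + 1 => simp [PySem.Chars.count.go]
  | cons c t ih =>
    intro fuel acc hlen
    match fuel with
    | 0 => simp at hlen
    | fuel + 1 =>
      rw [PySem.Chars.count.go]
      by_cases hc : c = '?'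
      · subst hc
        have hpre : List.isPrefixOf ['?'] ('?' :: t) = true := by
          simp [List.isPrefixOf]
        simp only [hpre, if_true, List.length_singleton, List.drop_one, List.tail_cons]
        rw [ih fuel (acc + 1) (by simpa using Nat.lt_succ_iff.mp (by simpa using hlen))]
        simp [List.count_cons]; omega
      · have hqc : ('?' : Char) ≠ c := fun h => hc h.symm
        have hpre : List.isPrefixOf ['?'] (c :: t) = false := by
          simp [List.isPrefixOf]; exact hqc
        simp only [hpre, if_false]
        rw [ih fuel acc (by simp at hlen; omega)]
        simp [List.count_cons, hc, hqc]

theorem pvStrCount_eq (s : String) : PySem.Str.count s "?" = s.toList.count '?' := by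
  rw [PySem.Str.count_eq]
  show PySem.Chars.count s.toList ['?'] = s.toList.count '?'
  rw [PySem.Chars.count]
  simpa using pvCount_go s.toList s.toList.length 0 le_rfl

-- Nat.toDigits 2 with enough fuel is pvBinAux
theorem pvToDigitsCore_eq : ∀ (fuel n : Nat) (acc : List Char), n < fuel →
    Nat.toDigitsCore 2 fuel n acc = pvBinAux n ++ acc := by
  intro fuel
  induction fuel with
  | zero => intro n acc h; omega
  | succ fuel ih =>
    intro n acc h
    rw [Nat.toDigitsCore]
    by_cases h0 : n / 2 = 0
    · simp only [h0, if_true]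
      rw [pvBinAux]
      simp [h0]
    · simp only [h0, if_false]
      rw [ih (n / 2) _ (by omega)]
      conv_rhs => rw [pvBinAux]
      simp [h0]

theorem pvToDigits_eq (n : Nat) : Nat.toDigits 2 n = pvBinAux n := by
  rw [Nat.toDigits, pvToDigitsCore_eq (n + 1) n [] (by omega)]
  simp

-- bin(i)[2:] for 0 ≤ i is pvBinAux
theorem pvSlice_toBinChars0b (j : Nat) :
    PySem.List.slice (PySem.Int.toBinChars0b (j : Int)) (some 2) none = pvBinAux j := by
  rw [PySem.Int.toBinChars0b, if_neg (by simp)]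
  rw [PySem.List.slice_from _ (by norm_num : (0:Int) ≤ 2)]
  simp [pvToDigits_eq]

-- zfill on an unsigned 0/1 string is pvPad
theorem pvZfill_eq_pad (cs : List Char) (k : Nat)
    (h : ∀ d ∈ cs, d = '0' ∨ d = '1') :
    PySem.Chars.zfill cs (k : Int) = pvPad cs k := by
  unfold PySem.Chars.zfill
  by_cases hk : k ≤ cs.length
  · rw [if_pos (by exact_mod_cast hk)]
    rw [pvPad, Nat.sub_eq_zero_of_le hk]
    simp
  · rw [if_neg (by exact_mod_cast hk)]
    match cs with
    | [] => simp [pvPad]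
    | c :: rest =>
      have hc : ¬(c = '+' ∨ c = '-') := by
        rcases h c (by simp) with h0 | h0 <;> simp [h0]
      simp only [hc, if_false]
      simp [pvPad]

theorem pvBinAux_length_le (k j : Nat) (hj : j < 2 ^ k) (hk : 1 ≤ k) :
    (pvBinAux j).length ≤ k := by
  by_cases hj0 : j = 0
  · subst hj0; rw [pvBinAux_zero]; simpa using hk
  · rw [pvBinAux_eq]; simp only [hj0, if_false]
    exact pvBits_length_le _ _ hj

-- every char of the padded bit string is '0' or '1' (in particular not '?')
theorem pvPerm_mem (j k : Nat) (d : Char) (hd : d ∈ pvPad (pvBinAux j) k) : d ≠ '?' := by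
  rcases pvPad_mem _ _ _ hd with h | h
  · rcases pvBinAux_mem _ _ h with h | h <;> simp [h]
  · simp [h]

-- A's inner loop, at index j, computes pvSubst of the padded binary of j
theorem pvInner_eq (cs : List Char) (j : Nat) (hj : j < 2 ^ cs.count '?') :
    (PySem.List.pyRange 0 ((cs.count '?' : Nat) : Int) 1).foldl
        (fun t i => pvReplQ t (PySem.List.pyGetD (pvPad (pvBinAux j) (cs.count '?')) i ' ')) cs
      = pvSubst cs (pvPad (pvBinAux j) (cs.count '?')) := by
  by_cases hk : cs.count '?' = 0
  · rw [hk]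
    rw [PySem.List.pyRange_one_eq_nil (by simp)]
    rw [pvSubst_count_zero cs _ hk]
    rfl
  · have hlen : (pvPad (pvBinAux j) (cs.count '?')).length = cs.count '?' := by
      rw [pvPad_length]
      have := pvBinAux_length_le (cs.count '?') j hj (by omega)
      omega
    rw [show ((cs.count '?' : Nat) : Int)
          = ((pvPad (pvBinAux j) (cs.count '?')).length : Int) by rw [hlen]]
    rw [PySem.List.foldl_pyRange_zero_pyGetD']
    exact pvReplQ_foldl_eq_subst cs _ (fun d hd => pvPerm_mem j _ d hd) (by rw [hlen])

theorem pvPrefix_singleton_iff (l : List Char) : (['?'] <+: l) ↔ l.head? = some '?' := by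
  cases l with
  | nil => simp
  | cons c t =>
    simp only [List.cons_prefix_cons, List.nil_prefix, and_true, List.head?_cons,
      Option.some_inj]
    exact ⟨fun h => h.symm, fun h => h.symm⟩

theorem pvFill_no_q (cs : List Char) (h : '?' ∉ cs) : pvFill cs = [cs] := by
  induction cs with
  | nil => rfl
  | cons c t ih =>
    have hc : c ≠ '?' := fun hq => h (hq ▸ List.mem_cons_self)
    have ht : '?' ∉ t := fun hm => h (List.mem_cons_of_mem c hm)
    simp [pvFill, hc, ih ht]

theorem pvFill_split (pre suf : List Char) (h : '?' ∉ pre) :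
    pvFill (pre ++ '?' :: suf)
      = (pvFill suf).map (fun t => pre ++ '0' :: t)
        ++ (pvFill suf).map (fun t => pre ++ '1' :: t) := by
  induction pre with
  | nil => simp [pvFill]
  | cons c pre ih =>
    have hc : c ≠ '?' := fun hq => h (hq ▸ List.mem_cons_self)
    have hpre : '?' ∉ pre := fun hm => h (List.mem_cons_of_mem c hm)
    simp only [List.cons_append, pvFill, hc, if_false, ih hpre]
    simp [List.map_map, Function.comp_def]

theorem pvFindFill_eq_fill (cs : List Char) : pvFindFill cs = pvFill cs := by
  induction cs using pvFindFill.induct with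
  | case1 cs h =>
    rw [pvFindFill, dif_pos h]
    have hno : '?' ∉ cs := by
      rw [PySem.Chars.find_eq_neg_one_iff] at h
      exact fun hm => h ((List.singleton_infix_iff '?' cs).mpr hm)
    rw [pvFill_no_q cs hno]
  | case2 cs h ih =>
    rw [pvFindFill, dif_neg h]
    have h0 : (0:Int) ≤ PySem.Chars.find cs ['?'] := by
      have := PySem.Chars.neg_one_le_find cs ['?']
      omega
    have hspec := PySem.Chars.find_spec h0
    -- cs splits as take i ++ '?' :: drop (i+1), the take i part '?'-free
    have hhead : (List.drop (PySem.Chars.find cs ['?']).toNat cs).head? = some '?' :=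
      (pvPrefix_singleton_iff _).mp hspec.1
    have hsplit : cs = List.take (PySem.Chars.find cs ['?']).toNat cs
        ++ '?' :: List.drop ((PySem.Chars.find cs ['?']).toNat + 1) cs := by
      conv_lhs => rw [← List.take_append_drop (PySem.Chars.find cs ['?']).toNat cs]
      congr 1
      rw [← List.tail_drop]
      cases hd : List.drop (PySem.Chars.find cs ['?']).toNat cs with
      | nil => rw [hd] at hhead; simp at hhead
      | cons x t => rw [hd] at hhead; simp at hhead; simp [hhead]
    have hpre_no : '?' ∉ List.take (PySem.Chars.find cs ['?']).toNat cs := by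
      intro hm
      rcases List.mem_iff_getElem.mp hm with ⟨m, hmlt, hme⟩
      have hmi : m < (PySem.Chars.find cs ['?']).toNat := by
        have := List.length_take_le (PySem.Chars.find cs ['?']).toNat cs
        omega
      apply hspec.2 m hmi
      rw [pvPrefix_singleton_iff, List.head?_drop]
      have hmcs : m < cs.length := by
        have := hmlt
        simp only [List.length_take] at this
        omega
      rw [List.getElem?_eq_getElem hmcs]
      rw [List.getElem_take] at hme
      rw [hme]
    -- rewrite the two slices
    have hslice_pre : PySem.List.slice cs none (some (PySem.Chars.find cs ['?']))
        = List.take (PySem.Chars.find cs ['?']).toNat cs := PySem.List.slice_to cs h0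
    have hslice_suf : PySem.List.slice cs (some (PySem.Chars.find cs ['?'] + 1)) none
        = List.drop ((PySem.Chars.find cs ['?']).toNat + 1) cs := by
      rw [PySem.List.slice_from _ (by omega : (0:Int) ≤ PySem.Chars.find cs ['?'] + 1)]
      congr 1
      omega
    rw [hslice_suf] at ih
    rw [hslice_pre, hslice_suf, ih]
    conv_rhs => rw [hsplit]
    rw [pvFill_split _ _ hpre_no]

theorem make_two_k_strings_eq (s : String) :
    make_two_k_strings s = make_two_k_strings_alt s := by
  unfold make_two_k_strings make_two_k_strings_alt
  rw [pvStrCount_eq s]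
  rw [PySem.List.foldl_append_singleton_eq_map]
  rw [List.nil_append]
  have hrange : PySem.List.pyRange 0 ((2:Int) ^ s.toList.count '?') 1
      = List.map (Nat.cast : Nat → Int) (List.range (2 ^ s.toList.count '?')) := by
    rw [PySem.List.pyRange_one]
    have h2 : (((2:Int) ^ s.toList.count '?') - 0).toNat = 2 ^ s.toList.count '?' := by
      rw [Int.sub_zero,
          show ((2:Int) ^ s.toList.count '?') = ((2 ^ s.toList.count '?' : Nat) : Int) by push_cast; ring,
          Int.toNat_natCast]
    rw [h2]
    apply List.map_congr_left
    intro a _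
    simp
  rw [hrange, List.map_map, pvFindFill_eq_fill, ← pv_main s.toList, List.map_map]
  apply List.map_congr_left
  intro j hj
  simp only [List.mem_range] at hj
  simp only [Function.comp_apply]
  congr 1
  rw [pvSlice_toBinChars0b j]
  rw [pvZfill_eq_pad _ _ (fun d hd => pvBinAux_mem j d hd)]
  exact pvInner_eq s.toList j hj

-- ===== VERDICT (by name: the statement is the Claim_ definition above) =====
theorem make_two_k_strings_spec : Claim_equal_make_two_k_strings := by
  intro s _
  show make_two_k_strings s = make_two_k_strings_alt s
  exact make_two_k_strings_eq s
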